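-- pv_equiv track=rewrite | github.com/Alex-Beng/ojs | FuckLeetcode/747. 至少是其他数字两倍的最大数.py | dominantIndex
-- ===== SOURCE A (Python) =====
-- def dominantIndex(nums: [int]) -> int:
--     n = len(nums)
--     if n==1:
--         return 0
--
--     nums = [(nums[i],i) for i in range(n)]
--     nums.sort(key=lambda k: k[0])
--     if nums[-1][0]>=nums[-2][0]*2:
--         return nums[-1][1]
--     else:
--         return -1
-- ===== SOURCE B (Python) =====
-- def dominantIndex(nums: [int]) -> int:
--     m1, idx, m2 = nums[0], 0, None
--     for i, v in enumerate(nums[1:], 1):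
--         if v >= m1:
--             m1, m2, idx = v, m1, i
--         elif m2 is None or v > m2:
--             m2 = v
--     return idx if m2 is None or m1 >= 2 * m2 else -1
-- ===== Notes on version B (the rewrite author's own statement) =====
-- stated objective: alternative
-- what changed: A builds (value,index) pairs and sorts them to read off the max and second max; B makes a single pass tracking the largest value, the second-largest value and the index of the (last) maximum.
import Mathlib
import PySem

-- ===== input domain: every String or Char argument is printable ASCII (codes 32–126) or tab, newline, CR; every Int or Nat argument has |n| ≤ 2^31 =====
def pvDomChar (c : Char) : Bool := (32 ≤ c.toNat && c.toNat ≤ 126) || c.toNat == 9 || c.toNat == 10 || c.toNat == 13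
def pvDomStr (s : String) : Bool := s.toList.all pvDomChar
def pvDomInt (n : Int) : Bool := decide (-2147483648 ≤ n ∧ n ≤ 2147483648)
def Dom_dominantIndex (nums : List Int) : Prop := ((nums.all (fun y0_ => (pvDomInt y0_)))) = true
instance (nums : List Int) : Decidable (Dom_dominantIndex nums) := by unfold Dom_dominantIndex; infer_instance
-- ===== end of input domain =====

-- B replaces A's sort of (value, index) pairs by a single pass tracking the two largest
-- values and the index of the (last) maximum; objective: alternative (one pass, no sort).

-- ===== PORT A =====
def dominantIndex (nums : List Int) : Int :=
  let n : Int := PySem.List.len nums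
  if n = 1 then 0
  else
    let pairs : List (Int × Int) :=
      (PySem.List.pyRange 0 n).map (fun i => (PySem.List.pyGetD nums i 0, i))
    let s := PySem.List.sorted pairs (fun k => k.1)
    match PySem.List.pyGet? s (-1), PySem.List.pyGet? s (-2) with
    | some la, some sl => if la.1 ≥ sl.1 * 2 then la.2 else -1
    | _, _ => -1   -- Python raises IndexError here (only when nums = []); excluded by Pre_

-- ===== PORT B =====
-- loop body of Source B: state (m1, m2, idx), pair (i, v)
def pvStepB (st : Int × Option Int × Int) (p : Int × Int) : Int × Option Int × Int :=
  if p.2 ≥ st.1 then (p.2, some st.1, p.1)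
  else
    match st.2.1 with
    | none => (st.1, some p.2, st.2.2)
    | some m => if p.2 > m then (st.1, some p.2, st.2.2) else st

def dominantIndex_alt (nums : List Int) : Int :=
  match nums with
  | [] => -1   -- Python raises IndexError (nums[0]); excluded by Pre_
  | x :: rest =>
    let st := (PySem.List.enumerate rest 1).foldl pvStepB (x, none, 0)
    match st.2.1 with
    | none => st.2.2
    | some m => if st.1 ≥ 2 * m then st.2.2 else -1

-- ===== PRECONDITION & SPEC =====
-- Pre_ excludes only the empty list, on which both Pythons raise IndexError.
def Pre_dominantIndex (nums : List Int) : Prop := nums ≠ []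
instance (nums : List Int) : Decidable (Pre_dominantIndex nums) := by unfold Pre_dominantIndex; infer_instance
def pvWitness_dominantIndex : List Int := [3, 6, 1, 0]

def Spec_dominantIndex (nums : List Int) (out : Int) : Prop := out = dominantIndex_alt nums
instance (nums : List Int) (out : Int) : Decidable (Spec_dominantIndex nums out) := by unfold Spec_dominantIndex; infer_instance

-- ===== CLAIM (what is proved, stated in full; the proofs are below) =====
def Claim_equal_dominantIndex : Prop := ∀ (nums : List Int), Dom_dominantIndex nums → Pre_dominantIndex nums → Spec_dominantIndex nums (dominantIndex nums)

-- ===== LEMMAS AND PROOFS =====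

-- the comparison used by A's sort
def pvBfr (a b : Int × Int) : Bool := decide (a.1 < b.1)
def pvLe1 (a b : Int × Int) : Prop := a.1 ≤ b.1
-- one insertion step of A's (stable insertion) sort
def pvInsA (acc : List (Int × Int)) (p : Int × Int) : List (Int × Int) :=
  PySem.List.insertBy pvBfr p acc
-- B's step on an A-style (value, index) pair
def pvStepB2 (st : Int × Option Int × Int) (p : Int × Int) : Int × Option Int × Int :=
  pvStepB st (p.2, p.1)

-- "the last element of acc is (m1, idx) and the key of the one before it is m2"
def pvLastTwo (acc : List (Int × Int)) (st : Int × Option Int × Int) : Prop :=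
  ∃ u, acc = u ++ [(st.1, st.2.2)] ∧ st.2.1 = u.getLast?.map Prod.fst

theorem pv_pairwise_insertBy (x : Int × Int) (ys : List (Int × Int))
    (h : ys.Pairwise pvLe1) : (PySem.List.insertBy pvBfr x ys).Pairwise pvLe1 := by
  induction ys with
  | nil => simp [PySem.List.insertBy]
  | cons y ys ih =>
    rw [List.pairwise_cons] at h
    by_cases hb : x.1 < y.1
    · rw [show PySem.List.insertBy pvBfr x (y :: ys) = x :: y :: ys by
        simp [PySem.List.insertBy, pvBfr, hb]]
      refine List.Pairwise.cons ?_ (List.Pairwise.cons h.1 h.2)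
      intro b hb2
      rcases List.mem_cons.1 hb2 with rfl | hmem
      · exact le_of_lt hb
      · exact le_trans (le_of_lt hb) (h.1 b hmem)
    · rw [show PySem.List.insertBy pvBfr x (y :: ys) = y :: PySem.List.insertBy pvBfr x ys by
        simp [PySem.List.insertBy, pvBfr, hb]]
      refine List.Pairwise.cons ?_ (ih h.2)
      intro b hb2
      rcases (PySem.List.mem_insertBy _ _ _ _).1 hb2 with rfl | hmem
      · exact le_of_not_gt hb
      · exact h.1 b hmem

theorem pv_ib_all (x : Int × Int) (ys : List (Int × Int))
    (h : ∀ y ∈ ys, y.1 ≤ x.1) : PySem.List.insertBy pvBfr x ys = ys ++ [x] := by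
  apply PySem.List.insertBy_of_forall_not_before
  intro y hy
  simpa [pvBfr] using h y hy

theorem pv_ib_mid (x z : Int × Int) (u w : List (Int × Int))
    (hu : ∀ y ∈ u, y.1 ≤ x.1) (hz : x.1 < z.1) :
    PySem.List.insertBy pvBfr x (u ++ z :: w) = u ++ x :: z :: w := by
  induction u with
  | nil => simp [PySem.List.insertBy, pvBfr, hz]
  | cons a u ih =>
    have ha : ¬ x.1 < a.1 := not_lt.2 (hu a List.mem_cons_self)
    simp only [List.cons_append]
    rw [show PySem.List.insertBy pvBfr x (a :: (u ++ z :: w))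
        = a :: PySem.List.insertBy pvBfr x (u ++ z :: w) by
      simp [PySem.List.insertBy, pvBfr, ha]]
    rw [ih (fun y hy => hu y (List.mem_cons_of_mem a hy))]

theorem pv_ib_tail (x z : Int × Int) (u w : List (Int × Int)) (hz : x.1 < z.1) :
    ∃ u', PySem.List.insertBy pvBfr x (u ++ z :: w) = u' ++ z :: w := by
  induction u with
  | nil =>
    refine ⟨[x], ?_⟩
    simp [PySem.List.insertBy, pvBfr, hz]
  | cons a u ih =>
    by_cases ha : x.1 < a.1
    · refine ⟨x :: a :: u, ?_⟩
      simp [PySem.List.insertBy, pvBfr, ha]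
    · obtain ⟨u', hu'⟩ := ih
      refine ⟨a :: u', ?_⟩
      simp only [List.cons_append]
      rw [show PySem.List.insertBy pvBfr x (a :: (u ++ z :: w))
          = a :: PySem.List.insertBy pvBfr x (u ++ z :: w) by
        simp [PySem.List.insertBy, pvBfr, ha]]
      rw [hu']

theorem pv_len_ins (x : Int × Int) (ys : List (Int × Int)) :
    (PySem.List.insertBy pvBfr x ys).length = ys.length + 1 := by
  induction ys with
  | nil => simp [PySem.List.insertBy]
  | cons a ys ih =>
    by_cases h : x.1 < a.1
    · simp [PySem.List.insertBy, pvBfr, h]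
    · simp [PySem.List.insertBy, pvBfr, h, ih]

theorem pv_len_fold (ps : List (Int × Int)) : ∀ acc,
    (ps.foldl pvInsA acc).length = acc.length + ps.length := by
  induction ps with
  | nil => intro acc; simp
  | cons p ps ih =>
    intro acc
    rw [List.foldl_cons, ih]
    simp [pvInsA, pv_len_ins]
    omega

theorem pv_step (acc st) (p : Int × Int)
    (hp : acc.Pairwise pvLe1) (hl : pvLastTwo acc st) :
    (pvInsA acc p).Pairwise pvLe1 ∧ pvLastTwo (pvInsA acc p) (pvStepB2 st p) := by
  obtain ⟨m1, m2, idx⟩ := st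
  obtain ⟨v, i⟩ := p
  obtain ⟨u, hacc, hm2⟩ := hl
  refine ⟨pv_pairwise_insertBy _ _ hp, ?_⟩
  have hu_le : ∀ y ∈ u, y.1 ≤ m1 := by
    intro y hy
    exact (List.pairwise_append.1 (hacc ▸ hp)).2.2 y hy (m1, idx) (List.mem_singleton.2 rfl)
  by_cases hge : v ≥ m1
  · -- new maximum (or tie): appended at the very end
    have hres : pvInsA acc (v, i) = acc ++ [(v, i)] := by
      apply pv_ib_all
      intro y hy
      rw [hacc] at hy
      rcases List.mem_append.1 hy with hy | hy
      · exact le_trans (hu_le y hy) hge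
      · rw [List.mem_singleton.1 hy]; exact hge
    have hstep : pvStepB2 (m1, m2, idx) (v, i) = (v, some m1, i) := by
      simp [pvStepB2, pvStepB, hge]
    rw [hres, hstep]
    exact ⟨u ++ [(m1, idx)], by rw [hacc], by simp⟩
  · rw [not_le] at hge
    cases hm2' : m2 with
    | none =>
      subst hm2'
      have hu : u = [] := by
        cases hgl : u.getLast? with
        | none => exact List.getLast?_eq_none_iff.1 hgl
        | some a => rw [hgl] at hm2; simp at hm2
      subst hu
      simp only [List.nil_append] at hacc
      have hres : pvInsA acc (v, i) = [(v, i), (m1, idx)] := by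
        rw [hacc]
        exact pv_ib_mid (v, i) (m1, idx) [] [] (by intro y hy; simp at hy) hge
      have hstep : pvStepB2 (m1, none, idx) (v, i) = (m1, some v, idx) := by
        simp [pvStepB2, pvStepB, not_le.2 hge]
      rw [hres, hstep]
      exact ⟨[(v, i)], by simp, by simp⟩
    | some m =>
      subst hm2'
      cases hgl : u.getLast? with
      | none => rw [hgl] at hm2; simp at hm2
      | some ul =>
        rw [hgl] at hm2
        have hm : m = ul.1 := by simpa using hm2
        obtain ⟨u₀, hu0⟩ := List.getLast?_eq_some_iff.1 hgl
        by_cases hmv : m ≤ v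
        · -- second place is replaced (or tied): lands just before the last element
          have hres : pvInsA acc (v, i) = u ++ (v, i) :: (m1, idx) :: [] := by
            rw [hacc]
            apply pv_ib_mid
            · intro y hy
              have hup : u.Pairwise pvLe1 := (List.pairwise_append.1 (hacc ▸ hp)).1
              rw [hu0] at hup hy
              rcases List.mem_append.1 hy with hy | hy
              · exact le_trans
                  ((List.pairwise_append.1 hup).2.2 y hy ul (List.mem_singleton.2 rfl))
                  (hm ▸ hmv)
              · rw [List.mem_singleton.1 hy]; exact (hm ▸ hmv)
            · exact hge
          have hstep : pvStepB2 (m1, some m, idx) (v, i) = (m1, some v, idx) := by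
            rcases lt_or_eq_of_le hmv with h | h
            · simp [pvStepB2, pvStepB, not_le.2 hge, h]
            · subst h
              simp [pvStepB2, pvStepB, not_le.2 hge]
          rw [hres, hstep]
          exact ⟨u ++ [(v, i)], by simp, by simp⟩
        · -- strictly below the second place: the last two elements are untouched
          rw [not_le] at hmv
          obtain ⟨u', hu'⟩ :=
            pv_ib_tail (v, i) ul u₀ [(m1, idx)] (by simpa [← hm] using hmv)
          have hres : pvInsA acc (v, i) = u' ++ ul :: [(m1, idx)] := by
            rw [hacc, hu0, List.append_assoc, List.singleton_append]
            exact hu'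
          have hstep : pvStepB2 (m1, some m, idx) (v, i) = (m1, some m, idx) := by
            simp [pvStepB2, pvStepB, not_le.2 hge, not_lt.2 (le_of_lt hmv)]
          rw [hres, hstep]
          refine ⟨u' ++ [ul], by simp, by simp [hm]⟩

theorem pv_main (ps : List (Int × Int)) (acc st)
    (hp : acc.Pairwise pvLe1) (hl : pvLastTwo acc st) :
    (ps.foldl pvInsA acc).Pairwise pvLe1 ∧
      pvLastTwo (ps.foldl pvInsA acc) (ps.foldl pvStepB2 st) := by
  induction ps generalizing acc st with
  | nil => exact ⟨hp, hl⟩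
  | cons p ps ih =>
    obtain ⟨h1, h2⟩ := pv_step acc st p hp hl
    exact ih _ _ h1 h2

theorem pv_A_eq_B (x r : Int) (rest' : List Int) :
    dominantIndex (x :: r :: rest') = dominantIndex_alt (x :: r :: rest') := by
  have hpairs :
      (PySem.List.pyRange 0 (PySem.List.len (x :: r :: rest'))).map
          (fun i => (PySem.List.pyGetD (x :: r :: rest') i 0, i))
        = ((0, x) :: PySem.List.enumerate (r :: rest') 1).map (fun q => (q.2, q.1)) := by
    rw [show ((0, x) :: PySem.List.enumerate (r :: rest') 1)
          = PySem.List.enumerate (x :: r :: rest') 0 by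
        rw [PySem.List.enumerate_cons]; norm_num]
    rw [PySem.List.enumerate_eq_map_pyRange (x :: r :: rest') 0, List.map_map]
    rfl
  have hs : PySem.List.sorted
        (((0, x) :: PySem.List.enumerate (r :: rest') 1).map (fun q => (q.2, q.1)))
        (fun k : Int × Int => k.1)
      = List.foldl pvInsA [(x, 0)]
          ((PySem.List.enumerate (r :: rest') 1).map (fun q => (q.2, q.1))) := by
    rw [PySem.List.sorted_eq_foldl_insertBy]
    rw [List.map_cons, List.foldl_cons]
    rfl
  have hB : ((PySem.List.enumerate (r :: rest') 1).map (fun q => (q.2, q.1))).foldl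
        pvStepB2 ((x : Int), (none : Option Int), (0 : Int))
      = (PySem.List.enumerate (r :: rest') 1).foldl pvStepB (x, none, 0) := by
    rw [List.foldl_map]
    apply PySem.List.foldl_congr_mem
    intro acc q hq
    rfl
  obtain ⟨hPW, hLT⟩ :=
    pv_main ((PySem.List.enumerate (r :: rest') 1).map (fun q => (q.2, q.1)))
      [(x, 0)] (x, none, 0) (by simp) ⟨[], rfl, rfl⟩
  obtain ⟨u, hseq, hm2⟩ := hLT
  have hlen : (((PySem.List.enumerate (r :: rest') 1).map (fun q => (q.2, q.1))).foldl
      pvInsA [(x, 0)]).length = rest'.length + 2 := by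
    rw [pv_len_fold]
    simp [PySem.List.length_enumerate]
    omega
  have hlen1 : ¬ (PySem.List.len (x :: r :: rest') = 1) := by
    simp [PySem.List.len]
    omega
  simp only [dominantIndex, dominantIndex_alt]
  rw [if_neg hlen1, hpairs, hs, ← hB]
  cases hm2' : (((PySem.List.enumerate (r :: rest') 1).map (fun q => (q.2, q.1))).foldl
      pvStepB2 ((x : Int), (none : Option Int), (0 : Int))).2.1 with
  | none =>
    exfalso
    rw [hm2'] at hm2
    have hu : u = [] := by
      cases hgl : u.getLast? with
      | none => exact List.getLast?_eq_none_iff.1 hgl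
      | some a => rw [hgl] at hm2; simp at hm2
    rw [hseq, hu] at hlen
    simp at hlen
  | some m =>
    rw [hm2'] at hm2
    cases hgl : u.getLast? with
    | none => rw [hgl] at hm2; simp at hm2
    | some ul =>
      rw [hgl] at hm2
      have hm : m = ul.1 := by simpa using hm2
      obtain ⟨u₀, hu0⟩ := List.getLast?_eq_some_iff.1 hgl
      have hseq' : ((PySem.List.enumerate (r :: rest') 1).map (fun q => (q.2, q.1))).foldl
          pvInsA [(x, 0)] = u₀ ++ ul ::
            [((((PySem.List.enumerate (r :: rest') 1).map (fun q => (q.2, q.1))).foldl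
              pvStepB2 ((x : Int), (none : Option Int), (0 : Int))).1,
             (((PySem.List.enumerate (r :: rest') 1).map (fun q => (q.2, q.1))).foldl
              pvStepB2 ((x : Int), (none : Option Int), (0 : Int))).2.2)] := by
        rw [hseq, hu0, List.append_assoc, List.singleton_append]
      rw [hseq']
      rw [show ∀ (a b : Int × Int) (l : List (Int × Int)),
            PySem.List.pyGet? (l ++ a :: [b]) (-1) = some b from ?_]
      · rw [show ∀ (a b : Int × Int) (l : List (Int × Int)),
              PySem.List.pyGet? (l ++ a :: [b]) (-2) = some a from ?_]
        · simp only [hm]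
          by_cases hcond : (((PySem.List.enumerate (r :: rest') 1).map
                (fun q => (q.2, q.1))).foldl pvStepB2
                ((x : Int), (none : Option Int), (0 : Int))).1 ≥ ul.1 * 2
          · rw [if_pos hcond, if_pos (by omega)]
          · rw [if_neg hcond, if_neg (by omega)]
        · intro a b l
          rw [show l ++ a :: [b] = (l ++ [a]) ++ [b] by simp]
          rw [PySem.List.pyGet?_neg_ofNat ((l ++ [a]) ++ [b]) 2 (by omega) (by simp)]
          simp
      · intro a b l
        rw [show l ++ a :: [b] = (l ++ [a]) ++ [b] by simp]
        exact PySem.List.pyGet?_neg_one_append_singleton _ _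

-- ===== VERDICT (by name: the statement is the Claim_ definition above) =====
theorem dominantIndex_spec : Claim_equal_dominantIndex := by
  unfold Claim_equal_dominantIndex
  intro nums _ hpre
  unfold Spec_dominantIndex
  match nums with
  | [] => exact absurd rfl hpre
  | [x] => rfl
  | x :: r :: rest' => exact pv_A_eq_B x r rest'
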